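-- pv_equiv track=rewrite | github.com/Levelent/CompChallenge | practice_problems/tarrif/tarrif_1.py | valid_response
-- ===== SOURCE A (Python) =====
-- def valid_response(text_box: str) -> bool:
--     accepted = ".ABCDEU"
--
--     # Check for illegal replacement character in original
--     if "." in text_box:
--         return False
--
--     # Remove whitespace, A* to replacement character
--     text_box = text_box.replace("A*", ".").replace(" ", "")
--
--     # Too many grades
--     if len(text_box) > 4:
--         return False
--
--     for char in text_box:
--         # Check for non-legal character
--         if char not in accepted:
--             return False
--
--     return True
-- ===== SOURCE B (Python) =====
-- import re
--
-- def valid_response(text_box: str) -> bool: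
--     # Check for illegal replacement character in original
--     if "." in text_box:
--         return False
--     # Remove whitespace, A* to replacement character
--     text_box = text_box.replace("A*", ".").replace(" ", "")
--     # One regex match validates both length (<= 4) and allowed characters
--     return re.fullmatch(r"[.ABCDEU]{0,4}", text_box) is not None
-- ===== Notes on version B (the rewrite author's own statement) =====
-- stated objective: idiomatic
-- what changed: The length guard and the per-character scan with early return are replaced by a single re.fullmatch against the pattern [.ABCDEU]{0,4}, which validates length and character set in one bounded-repetition match.
import Mathlib
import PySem

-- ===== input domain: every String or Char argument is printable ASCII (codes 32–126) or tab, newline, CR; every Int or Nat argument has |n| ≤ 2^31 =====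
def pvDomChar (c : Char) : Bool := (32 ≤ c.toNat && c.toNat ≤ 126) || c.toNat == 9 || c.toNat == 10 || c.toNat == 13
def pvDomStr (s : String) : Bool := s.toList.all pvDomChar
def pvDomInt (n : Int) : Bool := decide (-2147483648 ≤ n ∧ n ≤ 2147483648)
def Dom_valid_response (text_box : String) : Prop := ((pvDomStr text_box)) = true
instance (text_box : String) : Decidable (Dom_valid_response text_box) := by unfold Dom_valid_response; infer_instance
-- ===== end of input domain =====

-- B replaces A's length guard and per-character early-return scan by a single regex
-- fullmatch of the bounded character-class pattern [.ABCDEU]{0,4} (idiomatic).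

-- ===== PORT A =====
-- A's for-loop with early return: checks each char is a substring of ".ABCDEU"
def validLoopA (cs : List Char) : Bool :=
  match cs with
  | [] => true
  | c :: rest => if PySem.Chars.isIn [c] ".ABCDEU".toList then validLoopA rest else false

def valid_response (text_box : String) : Bool :=
  if PySem.Str.isIn "." text_box then false
  else
    let t := PySem.Str.replace (PySem.Str.replace text_box "A*" ".") " " ""
    if PySem.Str.len t > 4 then false
    else validLoopA t.toList

-- ===== PORT B =====
-- regex engine for the pattern <class>{0,n}: consume up to n chars of the class, must reach end
def reClassRep (allowed : List Char) : Nat → List Char → Bool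
  | _, [] => true
  | 0, _ :: _ => false
  | n + 1, c :: rest => allowed.contains c && reClassRep allowed n rest

def valid_response_alt (text_box : String) : Bool :=
  if PySem.Str.isIn "." text_box then false
  else
    let t := PySem.Str.replace (PySem.Str.replace text_box "A*" ".") " " ""
    reClassRep ".ABCDEU".toList 4 t.toList

-- ===== PRECONDITION & SPEC =====
def Spec_valid_response (text_box : String) (out : Bool) : Prop := out = valid_response_alt text_box
instance (text_box : String) (out : Bool) : Decidable (Spec_valid_response text_box out) := by unfold Spec_valid_response; infer_instance

-- ===== CLAIM (what is proved, stated in full; the proofs are below) =====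
def Claim_equal_valid_response : Prop := ∀ (text_box : String), Dom_valid_response text_box → Spec_valid_response text_box (valid_response text_box)

-- ===== LEMMAS AND PROOFS =====

-- A's one-char substring test equals list membership
theorem isIn_singleton (c : Char) (l : List Char) :
    PySem.Chars.isIn [c] l = l.contains c := by
  by_cases h : c ∈ l
  · simp [(PySem.Chars.isIn_iff_infix [c] l).mpr ((List.singleton_infix_iff c l).mpr h), h]
  · have hf : ¬ PySem.Chars.isIn [c] l = true := fun hb =>
      h ((List.singleton_infix_iff c l).mp ((PySem.Chars.isIn_iff_infix [c] l).mp hb))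
    simp only [Bool.not_eq_true] at hf
    simp [hf, h]

-- A's (length guard + scan) equals B's bounded class match
theorem loop_eq_reClassRep (n : Nat) (cs : List Char) :
    (if cs.length > n then false else validLoopA cs) = reClassRep ".ABCDEU".toList n cs := by
  induction cs generalizing n with
  | nil => simp [validLoopA, reClassRep]
  | cons c rest ih =>
    match n with
    | 0 => simp [reClassRep]
    | m + 1 =>
      rw [reClassRep, ← ih m]
      simp only [validLoopA, isIn_singleton, List.length_cons]
      have hiff : rest.length + 1 > m + 1 ↔ rest.length > m := by omega
      simp [hiff, Bool.and_left_comm]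

-- ===== VERDICT (by name: the statement is the Claim_ definition above) =====
theorem valid_response_spec : Claim_equal_valid_response := by
  intro s _
  unfold Spec_valid_response valid_response valid_response_alt
  simp only [PySem.Str.isIn, PySem.Str.len_eq, ← loop_eq_reClassRep]
  norm_cast
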